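-- pv_equiv track=rewrite | github.com/chernenko-art/gib_learn_python | lesson_6_2.py | check_sum_of_digits
-- ===== SOURCE A (Python) =====
-- def list_of_digits(number):
--     digits_list = []
--     while number > 0:
--         digits_list.append(number % 10)
--         number //= 10
--     return digits_list
--
-- def check_sum_of_digits(number):
--     even_sum = 0
--     odd_sum = 0
--     digits_list = list_of_digits(number)
--     for i in range(len(digits_list)):
--         if i % 2 == 0:
--             even_sum += digits_list[i]
--         else:
--             odd_sum += digits_list[i]
--     if even_sum == odd_sum:
--         return True
-- ===== SOURCE B (Python) =====
-- def check_sum_of_digits(number):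
--     acc = 0
--     sign = 1
--     while number > 0:
--         acc += sign * (number % 10)
--         sign = -sign
--         number //= 10
--     if acc == 0:
--         return True
-- ===== Notes on version B (the rewrite author's own statement) =====
-- stated objective: simpler
-- what changed: B fuses digit extraction and summation into one loop maintaining a single alternating-sign accumulator instead of building a digits list and re-scanning it with two position-indexed sums.
import Mathlib
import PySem

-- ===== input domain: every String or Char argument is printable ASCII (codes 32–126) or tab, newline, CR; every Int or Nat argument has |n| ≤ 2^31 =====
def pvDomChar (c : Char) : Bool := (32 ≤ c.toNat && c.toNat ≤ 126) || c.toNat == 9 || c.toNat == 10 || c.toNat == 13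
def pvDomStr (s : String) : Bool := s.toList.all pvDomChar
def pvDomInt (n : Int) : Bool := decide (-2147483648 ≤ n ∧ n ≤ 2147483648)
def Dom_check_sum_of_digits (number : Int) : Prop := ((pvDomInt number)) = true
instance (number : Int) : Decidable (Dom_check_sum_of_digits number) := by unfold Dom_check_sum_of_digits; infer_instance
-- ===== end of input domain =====

-- B fuses A's digit-list build + indexed re-scan into one loop with a single alternating-sign accumulator (simpler, same cost).


-- ===== PORT A =====
-- while number > 0: append number % 10; number //= 10
def pvListOfDigits (number : Int) : List Int :=
  if h : number > 0 then
    PySem.Int.mod number 10 :: pvListOfDigits (PySem.Int.floordiv number 10)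
  else []
termination_by number.toNat
decreasing_by
  rw [PySem.Int.floordiv_eq_ediv_of_pos (by norm_num)]
  omega

-- for i in range(len(digits_list)): add digits_list[i] to even_sum or odd_sum.
-- digits_list[i] is ported as pyGetD … 0; every i produced by the range is in bounds, so this is exact.
def check_sum_of_digits (number : Int) : Option Bool :=
  let digits_list := pvListOfDigits number
  let p := (PySem.List.pyRange 0 (digits_list.length : Int) 1).foldl
    (fun (s : Int × Int) i =>
      if PySem.Int.mod i 2 = 0 then (s.1 + PySem.List.pyGetD digits_list i 0, s.2)
      else (s.1, s.2 + PySem.List.pyGetD digits_list i 0))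
    (0, 0)
  if p.1 = p.2 then some true else none

-- ===== PORT B =====
-- single loop: acc += sign * (number % 10); sign = -sign; number //= 10
def pvAltLoop (number sign acc : Int) : Int :=
  if h : number > 0 then
    pvAltLoop (PySem.Int.floordiv number 10) (-sign) (acc + sign * PySem.Int.mod number 10)
  else acc
termination_by number.toNat
decreasing_by
  rw [PySem.Int.floordiv_eq_ediv_of_pos (by norm_num)]
  omega

def check_sum_of_digits_alt (number : Int) : Option Bool :=
  if pvAltLoop number 1 0 = 0 then some true else none

-- ===== PRECONDITION & SPEC =====
def Spec_check_sum_of_digits (number : Int) (out : Option Bool) : Prop := out = check_sum_of_digits_alt number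
instance (number : Int) (out : Option Bool) : Decidable (Spec_check_sum_of_digits number out) := by unfold Spec_check_sum_of_digits; infer_instance

-- ===== CLAIM (what is proved, stated in full; the proofs are below) =====
def Claim_equal_check_sum_of_digits : Prop := ∀ (number : Int), Dom_check_sum_of_digits number → Spec_check_sum_of_digits number (check_sum_of_digits number)

-- ===== LEMMAS AND PROOFS =====

-- alternating sum of a digit list: d0 - d1 + d2 - …
def pvAlt : List Int → Int
  | [] => 0
  | d :: ds => d - pvAlt ds

-- B's loop computes acc + sign * (alternating sum of A's digit list)
theorem pvAltLoop_eq (number : Int) : ∀ sign acc : Int,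
    pvAltLoop number sign acc = acc + sign * pvAlt (pvListOfDigits number) := by
  induction number using pvListOfDigits.induct with
  | case1 n h ih =>
    intro sign acc
    rw [pvAltLoop, pvListOfDigits]
    simp only [h, dif_pos, ih, pvAlt]
    ring
  | case2 n h =>
    intro sign acc
    rw [pvAltLoop, pvListOfDigits]
    simp only [h, dif_neg, not_false_iff, pvAlt]
    ring

-- A's indexed loop, started at index k, changes even_sum - odd_sum by (-1)^k * pvAlt (drop k)
theorem pvLoopA (ds : List Int) : ∀ (m k : Nat) (e o : Int), ds.length = k + m →
    (((PySem.List.pyRange (k : Int) (ds.length : Int) 1).foldl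
      (fun (s : Int × Int) i =>
        if PySem.Int.mod i 2 = 0 then (s.1 + PySem.List.pyGetD ds i 0, s.2)
        else (s.1, s.2 + PySem.List.pyGetD ds i 0)) (e, o)).1
     - ((PySem.List.pyRange (k : Int) (ds.length : Int) 1).foldl
      (fun (s : Int × Int) i =>
        if PySem.Int.mod i 2 = 0 then (s.1 + PySem.List.pyGetD ds i 0, s.2)
        else (s.1, s.2 + PySem.List.pyGetD ds i 0)) (e, o)).2)
    = (e - o) + (if k % 2 = 0 then pvAlt (ds.drop k) else - pvAlt (ds.drop k)) := by
  intro m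
  induction m with
  | zero =>
    intro k e o hk
    rw [PySem.List.pyRange_one_eq_nil (by omega)]
    simp [List.drop_eq_nil_of_le (by omega : ds.length ≤ k), pvAlt]
  | succ m ih =>
    intro k e o hk
    have hklt : k < ds.length := by omega
    rw [PySem.List.pyRange_one_cons (by exact_mod_cast hklt), List.foldl_cons]
    have hmod : PySem.Int.mod (k : Int) 2 = ((k % 2 : Nat) : Int) := PySem.Int.mod_natCast k 2
    have hget : PySem.List.pyGetD ds (k : Int) 0 = ds[k] := by
      rw [PySem.List.pyGetD_natCast]; exact List.getD_eq_getElem ds 0 hklt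
    have hdrop : ds.drop k = ds[k] :: ds.drop (k + 1) := List.drop_eq_getElem_cons hklt
    have hcast : ((k : Int) + 1) = ((k + 1 : Nat) : Int) := by push_cast; ring
    rcases Nat.even_or_odd k with hpar | hpar
    · have h0 : k % 2 = 0 := Nat.even_iff.mp hpar
      have h1 : (k + 1) % 2 = 1 := by omega
      have hstep := ih (k + 1) (e + ds[k]) o (by omega)
      rw [h1] at hstep
      rw [if_neg (by norm_num)] at hstep
      simp only [hmod, h0, Nat.cast_zero, hget]
      simp only [if_true]
      rw [hcast, hstep, hdrop]
      simp only [pvAlt]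
      ring
    · have h0 : k % 2 = 1 := Nat.odd_iff.mp hpar
      have h1 : (k + 1) % 2 = 0 := by omega
      have hstep := ih (k + 1) e (o + ds[k]) (by omega)
      rw [h1] at hstep
      rw [if_pos rfl] at hstep
      simp only [hmod, h0, Nat.cast_one, hget]
      rw [if_neg (by norm_num), hcast, hstep, hdrop]
      simp only [pvAlt]
      rw [if_neg (by omega)]
      ring

-- ===== VERDICT (by name: the statement is the Claim_ definition above) =====
theorem check_sum_of_digits_spec : Claim_equal_check_sum_of_digits := by
  intro number _
  unfold Spec_check_sum_of_digits check_sum_of_digits check_sum_of_digits_alt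
  have hB := pvAltLoop_eq number 1 0
  have hA := pvLoopA (pvListOfDigits number) (pvListOfDigits number).length 0 0 0 (by omega)
  simp only [Nat.cast_zero] at hA
  simp only [List.drop_zero] at hA
  rw [hB]
  refine if_congr ?_ rfl rfl
  constructor <;> intro h <;> omega
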